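-- pv_equiv track=rewrite | github.com/pedroluisguerra/GAME | lits_utils.py | find_streak
-- ===== SOURCE A (Python) =====
-- def find_streak(list, needle, n):
--    """
--     Devuelve True si en list hay n o más needles seguidos
--     False, para todo lo demás
--     """
--     # si n >= 0
--    if n >= 0:
--         #Inicializo el indice, el contador y el indicador de racha
--         index = 0
--         count = 0
--         streak = False
--
--         # Mientras no haya encontradoa n seguidos u la lista no se haya acabao....
--         while count < n and index < len(list):
--             # si lo encuentro, activo el indicado de rachas y actualizo el contador
--             if needle == list[index]:
--                 streak = True
--                 count = count + 1
--             else: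
--                 # si no lo encuentro, desactivo el indicador de de racha y pongo a cero el contador
--                 streak = False
--                 count =0
--
--             # avanzo al siguiente elemento
--             index = index + 1
--
--         # devolvemos el resultado de comparar el contador con n SIEMPRE Y CUANDO  estemos en racha
--         return count >= n and streak
--    else:
--         # para valores de n < 0, no tiene sentido
--         return False
-- ===== SOURCE B (Python) =====
-- def find_streak(list, needle, n):
--     """
--     Devuelve True si en list hay n o mas needles seguidos
--     False, para todo lo demas
--     """
--     if n < 1:
--         return False
--     i = 0
--     length = len(list)
--     while i < length:
--         # find the end of the maximal run starting at i
--         j = i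
--         while j < length and list[j] == list[i]:
--             j = j + 1
--         if list[i] == needle and j - i >= n:
--             return True
--         i = j
--     return False
-- ===== Notes on version B (the rewrite author's own statement) =====
-- stated objective: alternative
-- what changed: B segments the list into maximal runs of equal adjacent elements and returns True on the first needle-run of length >= n (with a single n<1 guard), instead of A's running counter plus streak flag with a count-threshold loop condition.
import Mathlib
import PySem

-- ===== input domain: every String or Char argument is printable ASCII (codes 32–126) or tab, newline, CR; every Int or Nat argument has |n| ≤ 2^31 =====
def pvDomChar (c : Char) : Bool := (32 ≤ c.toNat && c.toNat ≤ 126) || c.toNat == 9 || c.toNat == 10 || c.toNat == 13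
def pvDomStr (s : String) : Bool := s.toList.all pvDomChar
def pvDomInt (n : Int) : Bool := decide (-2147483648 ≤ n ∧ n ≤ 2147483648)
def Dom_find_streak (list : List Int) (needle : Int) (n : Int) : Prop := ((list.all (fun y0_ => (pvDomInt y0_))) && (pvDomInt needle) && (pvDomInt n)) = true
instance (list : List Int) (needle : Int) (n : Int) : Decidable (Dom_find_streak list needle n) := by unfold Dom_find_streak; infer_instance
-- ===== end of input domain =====

-- B replaces A's running counter + streak flag by a scan over maximal runs of
-- adjacent equal elements, returning True on the first needle-run of length ≥ n
-- (alternative decomposition, same cost).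

-- ===== PORT A =====
-- the while loop: state (count, streak), scanning the remaining suffix of list
def find_streak_loop (needle n : Int) (xs : List Int) (count : Int) (streak : Bool) :
    Int × Bool :=
  if count < n then
    match xs with
    | [] => (count, streak)
    | x :: rest =>
      if needle == x then find_streak_loop needle n rest (count + 1) true
      else find_streak_loop needle n rest 0 false
  else (count, streak)

def find_streak (list : List Int) (needle : Int) (n : Int) : Bool :=
  if 0 ≤ n then
    let r := find_streak_loop needle n list 0 false
    decide (n ≤ r.1) && r.2
  else
    false

-- ===== PORT B =====
-- the outer while loop of Source B: split off the maximal run at the head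
-- (inner while = takeWhile/dropWhile), test it, continue with the rest
def find_streak_runs (list : List Int) (needle : Int) (n : Int) : Bool :=
  match list with
  | [] => false
  | x :: xs =>
    -- j - i = length of the maximal run at the head = takeWhile length + 1
    if x == needle && decide (n ≤ ((xs.takeWhile (fun y => y == x)).length : Int) + 1) then true
    else find_streak_runs (xs.dropWhile (fun y => y == x)) needle n
termination_by list.length
decreasing_by
  simp only [List.length_cons]
  exact Nat.lt_succ_of_le (List.length_dropWhile_le _ _)

def find_streak_alt (list : List Int) (needle : Int) (n : Int) : Bool :=
  if n < 1 then false
  else find_streak_runs list needle n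

-- ===== PRECONDITION & SPEC =====
def Spec_find_streak (list : List Int) (needle : Int) (n : Int) (out : Bool) : Prop := out = find_streak_alt list needle n
instance (list : List Int) (needle : Int) (n : Int) (out : Bool) : Decidable (Spec_find_streak list needle n out) := by unfold Spec_find_streak; infer_instance

-- ===== CLAIM (what is proved, stated in full; the proofs are below) =====
def Claim_equal_find_streak : Prop := ∀ (list : List Int) (needle : Int) (n : Int), Dom_find_streak list needle n → Spec_find_streak list needle n (find_streak list needle n)

-- ===== LEMMAS AND PROOFS =====

-- intermediate characterisation of A's loop: "the counter reaches n"
def best (needle n : Int) : List Int → Int → Bool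
  | [], _ => false
  | x :: xs, c =>
    if needle == x then decide (n ≤ c + 1) || best needle n xs (c + 1)
    else best needle n xs 0

-- streak invariant of A's loop
theorem loop_streak (needle n : Int) :
    ∀ (xs : List Int) (c : Int), 0 ≤ c →
      (find_streak_loop needle n xs c (decide (0 < c))).2
        = decide (0 < (find_streak_loop needle n xs c (decide (0 < c))).1) := by
  intro xs
  induction xs with
  | nil =>
    intro c _; rw [find_streak_loop]
    split <;> simp
  | cons x rest ih =>
    intro c hc; rw [find_streak_loop]
    split
    · by_cases hx : needle == x
      · simp only [hx, if_pos]
        have h1 : (true : Bool) = decide (0 < c + 1) := by simp; omega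
        rw [h1]; exact ih (c + 1) (by omega)
      · simp only [hx, Bool.false_eq_true, if_false]
        have h0 : (false : Bool) = decide ((0:Int) < 0) := by simp
        rw [h0]; exact ih 0 le_rfl
    · simp

-- A's loop reaches counter n exactly when `best` says so
theorem loop_best (needle n : Int) :
    ∀ (xs : List Int) (c : Int) (s : Bool), 0 ≤ c → c < n →
      decide (n ≤ (find_streak_loop needle n xs c s).1) = best needle n xs c := by
  intro xs
  induction xs with
  | nil =>
    intro c s _ hcn; rw [find_streak_loop]
    simp only [if_pos hcn, best]
    simp; omega
  | cons x rest ih =>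
    intro c s hc hcn; rw [find_streak_loop]
    simp only [if_pos hcn, best]
    by_cases hx : needle == x
    · simp only [hx, if_pos]
      by_cases h1 : n ≤ c + 1
      · have hn : c + 1 = n := by omega
        rw [hn, find_streak_loop.eq_def]
        simp only [lt_irrefl, if_false]
        simp
      · have : (decide (n ≤ c + 1) : Bool) = false := by simp; omega
        rw [this, Bool.false_or]
        exact ih (c + 1) true (by omega) (by omega)
    · simp only [hx, Bool.false_eq_true, if_false]
      exact ih 0 false le_rfl (by omega)

-- running through a block of needles just adds its length to the counter
theorem best_run (needle n : Int) :
    ∀ (t : List Int) (d : List Int) (c : Int), (∀ y ∈ t, needle == y) → c < n →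
      best needle n (t ++ d) c
        = if n ≤ c + (t.length : Int) then true else best needle n d (c + (t.length : Int)) := by
  intro t
  induction t with
  | nil =>
    intro d c _ hcn
    simp only [List.nil_append, List.length_nil]
    rw [if_neg (by push_cast; omega)]
    norm_num
  | cons y t ih =>
    intro d c hall hcn
    have hy : needle == y := hall y (List.mem_cons_self)
    simp only [List.cons_append, best, hy, if_pos, List.length_cons]
    by_cases h1 : n ≤ c + 1
    · rw [if_pos (by push_cast; omega)]; simp [h1]
    · have hd : (decide (n ≤ c + 1) : Bool) = false := by simp; omega
      rw [hd, Bool.false_or, ih d (c + 1) (fun z hz => hall z (List.mem_cons_of_mem _ hz)) (by omega)]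
      push_cast
      by_cases h2 : n ≤ c + (t.length : Int) + 1
      · rw [if_pos (by omega), if_pos (by omega)]
      · rw [if_neg (by omega), if_neg (by omega)]
        ring_nf

-- a block of non-needles is skipped (counter already 0)
theorem best_skip (needle n : Int) :
    ∀ (t : List Int) (d : List Int), (∀ y ∈ t, ¬ (needle == y)) →
      best needle n (t ++ d) 0 = best needle n d 0 := by
  intro t
  induction t with
  | nil => intro d _; simp
  | cons y t ih =>
    intro d hall
    have hy : ¬ (needle == y) := hall y (List.mem_cons_self)
    simp only [List.cons_append, best, hy, Bool.false_eq_true, if_false]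
    exact ih d (fun z hz => hall z (List.mem_cons_of_mem _ hz))

-- the counter is irrelevant when the list does not start with a needle
theorem best_head_irrel (needle n : Int) (d : List Int) (c c' : Int)
    (hd : ∀ z, d.head? = some z → ¬ (needle == z)) :
    best needle n d c = best needle n d c' := by
  cases d with
  | nil => rfl
  | cons z d' =>
    have hz : ¬ (needle == z) := hd z rfl
    simp [best, hz]

theorem head?_dropWhile (x : Int) :
    ∀ (xs : List Int) (z : Int), (xs.dropWhile (fun y => y == x)).head? = some z → ¬ (z == x) := by
  intro xs
  induction xs with
  | nil => intro z h; simp at h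
  | cons y ys ih =>
    intro z h
    by_cases hy : (y == x)
    · rw [List.dropWhile_cons_of_pos (by simpa using hy)] at h
      exact ih z h
    · rw [List.dropWhile_cons_of_neg (by simpa using hy)] at h
      simp only [List.head?_cons, Option.some.injEq] at h
      subst h
      simpa using hy

-- `best` at counter 0 is exactly B's run scan
theorem best_runs_aux (needle n : Int) (hn : 0 < n) :
    ∀ (N : Nat) (xs : List Int), xs.length ≤ N →
      best needle n xs 0 = find_streak_runs xs needle n := by
  intro N
  induction N with
  | zero =>
    intro xs h
    have hnil : xs = [] := List.eq_nil_of_length_eq_zero (Nat.le_zero.mp h)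
    subst hnil
    rw [find_streak_runs]
    rfl
  | succ N ihN =>
    intro xs hlen
    cases xs with
    | nil => rw [find_streak_runs]; rfl
    | cons x rest =>
      rw [find_streak_runs]
      set t := rest.takeWhile (fun y => y == x) with htw
      set d := rest.dropWhile (fun y => y == x) with hdw
      have hsplit : rest = t ++ d :=
        (List.takeWhile_append_dropWhile (p := fun y => y == x) (l := rest)).symm
      have hdlen : d.length ≤ N :=
        le_trans (List.length_dropWhile_le _ _) (by simpa using Nat.le_of_succ_le_succ hlen)
      have ihd := ihN _ hdlen
      have ht : ∀ y ∈ t, y = x :=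
        fun y hy => by simpa using (List.mem_takeWhile_imp hy)
      have hdh : ∀ z, d.head? = some z → ¬ (z == x) := fun z hz => head?_dropWhile x rest z (by rw [← hdw]; exact hz)
      by_cases hx : x = needle
      · subst hx
        simp only [best, beq_self_eq_true, if_pos, Bool.true_and, zero_add]
        by_cases h1 : n ≤ (1 : Int)
        · have hd1 : (decide (n ≤ (1:Int)) : Bool) = true := by simp [h1]
          rw [hd1, Bool.true_or, if_pos (by simp; omega)]
        · have hd1 : (decide (n ≤ (1:Int)) : Bool) = false := by simp; omega
          have hbr : best x n rest 1
              = if n ≤ 1 + (t.length : Int) then true else best x n d (1 + (t.length : Int)) := by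
            rw [hsplit]
            exact best_run x n t d 1 (fun y hy => by rw [ht y hy]; simp) (by omega)
          rw [hd1, Bool.false_or, hbr]
          by_cases h2 : n ≤ 1 + ((t.length : Int))
          · rw [if_pos h2, if_pos (by simp; omega)]
          · rw [if_neg h2, if_neg (by simp; omega),
              best_head_irrel x n d (1 + ((t.length : Int))) 0
                (fun z hz => by
                  have := hdh z hz
                  intro hc
                  exact this (by rw [beq_iff_eq] at hc ⊢; omega))]
            exact ihd
      · have hxb : (needle == x) = false := by simpa using fun h => hx h.symm
        have hxb' : (x == needle) = false := by simpa using hx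
        simp only [best, hxb, Bool.false_eq_true, if_false, hxb', Bool.false_and]
        have hbs : best needle n rest 0 = best needle n d 0 := by
          rw [hsplit]
          exact best_skip needle n t d (fun y hy => by rw [ht y hy]; simp [hxb])
        rw [hbs]
        exact ihd

theorem best_runs (needle n : Int) (hn : 0 < n) (xs : List Int) :
    best needle n xs 0 = find_streak_runs xs needle n :=
  best_runs_aux needle n hn xs.length xs le_rfl

-- ===== VERDICT (by name: the statement is the Claim_ definition above) =====
theorem find_streak_spec : Claim_equal_find_streak := by
  intro list needle n _
  unfold Spec_find_streak find_streak find_streak_alt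
  by_cases hn1 : n < 1
  · rw [if_pos hn1]
    by_cases hn0 : 0 ≤ n
    · rw [if_pos hn0]
      have hn : n = 0 := by omega
      subst hn
      show (let r := find_streak_loop needle 0 list 0 false; decide ((0:Int) ≤ r.1) && r.2) = false
      rw [find_streak_loop.eq_def]
      simp
    · rw [if_neg hn0]
  · have hn : 0 < n := by omega
    rw [if_neg hn1, if_pos (by omega)]
    show (decide (n ≤ (find_streak_loop needle n list 0 false).1) && (find_streak_loop needle n list 0 false).2) = find_streak_runs list needle n
    have hs := loop_streak needle n list 0 le_rfl
    simp only [show (decide ((0:Int) < 0) : Bool) = false by simp] at hs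
    rw [hs]
    have hb := loop_best needle n list 0 false le_rfl hn
    rw [← best_runs needle n hn list, ← hb]
    by_cases h : n ≤ (find_streak_loop needle n list 0 false).1
    · simp [h]; omega
    · simp [h]
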